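-- pv_equiv track=rewrite | github.com/lengyanyu258/ArknightsWordCount | game_data/dump.py | __merge_sheets_list
-- ===== SOURCE A (Python) =====
-- def __merge_sheets_list(sheets: list[list[list]]) -> list[list]:
--     sheet_list = sheets[0]
--     for sheet in sheets[1:]:
--         len_sheet_bar = len(sheet_list[0])
--         for index, bar in enumerate(sheet):
--             content_bar = [None] + bar
--             try:
--                 sheet_list[index] += content_bar
--             except IndexError:
--                 sheet_list.append([None] * len_sheet_bar + content_bar)
--         else:
--             len_amend_sheet = len(sheet_list[0]) - len_sheet_bar
--             content_bar = [None] * len_amend_sheet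
--             for bar in sheet_list[len(sheet) :]:
--                 bar += content_bar
--     return sheet_list
-- ===== SOURCE B (Python) =====
-- # Row-major reconstruction: compute row count and per-sheet block widths, then
-- # build the merged table row by row (writes the result back into sheets[0], as
-- # the original does).
-- def __merge_sheets_list(sheets: list[list[list]]) -> list[list]:
--     base = sheets[0]
--     rest = [s for s in sheets[1:] if s]
--     rows = max([len(base)] + [len(s) for s in rest])
--     w0 = len(base[0]) if base else 0
--     merged = [
--         (base[i] if i < len(base) else [None] * w0)
--         + [c for s in rest
--              for c in (([None] + s[i]) if i < len(s) else [None] * (1 + len(s[0])))]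
--         for i in range(rows)
--     ]
--     base[:] = merged
--     return base
-- ===== Notes on version B (the rewrite author's own statement) =====
-- stated objective: alternative
-- what changed: Replaces A's sheet-by-sheet in-place accumulation (try/except IndexError append plus a trailing padding pass per sheet) by a single row-major construction: compute the row count and each sheet's block width once, then build every merged row in one comprehension and write it back into sheets[0].
import Mathlib
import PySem

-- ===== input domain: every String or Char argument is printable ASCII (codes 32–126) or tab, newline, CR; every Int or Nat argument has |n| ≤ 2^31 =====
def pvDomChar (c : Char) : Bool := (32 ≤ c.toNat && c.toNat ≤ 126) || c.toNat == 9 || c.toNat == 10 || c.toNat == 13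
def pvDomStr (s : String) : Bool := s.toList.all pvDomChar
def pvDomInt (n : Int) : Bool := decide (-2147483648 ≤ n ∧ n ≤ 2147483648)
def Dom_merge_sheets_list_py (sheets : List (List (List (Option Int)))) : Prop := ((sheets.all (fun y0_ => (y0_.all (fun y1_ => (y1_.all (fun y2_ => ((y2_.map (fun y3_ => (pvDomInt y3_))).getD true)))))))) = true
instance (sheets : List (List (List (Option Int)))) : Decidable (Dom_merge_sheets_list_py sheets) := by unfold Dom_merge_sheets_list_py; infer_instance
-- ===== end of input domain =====

-- B rebuilds the merged table row-by-row from precomputed widths instead of A's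
-- in-place sheet-by-sheet accumulation; equivalence is about the RETURN value
-- (Python A mutates sheets[0] in place; Python B writes the result back into it).

-- ===== PORT A =====
-- inner loop 'for index, bar in enumerate(sheet)' of A, carrying the accumulator
-- sheet_list and the running index; the try/except IndexError becomes the bounds test
def pvInnerA (lsb : Nat) : List (List (Option Int)) → Nat → List (List (Option Int)) → List (List (Option Int))
  | acc, _, [] => acc
  | acc, i, bar :: rest =>
    pvInnerA lsb
      (if i < acc.length then acc.modify i (· ++ (none :: bar))
       else acc ++ [List.replicate lsb (none : Option Int) ++ (none :: bar)])
      (i + 1) rest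

-- body of A's outer 'for sheet in sheets[1:]' loop
def pvStepA (sl : List (List (Option Int))) (sheet : List (List (Option Int))) : List (List (Option Int)) :=
  let lsb := (sl.getD 0 []).length
  let sl2 := pvInnerA lsb sl 0 sheet
  let amend := (sl2.getD 0 []).length - lsb
  sl2.mapIdx (fun i row => if i < sheet.length then row else row ++ List.replicate amend (none : Option Int))

def merge_sheets_list_py (sheets : List (List (List (Option Int)))) : List (List (Option Int)) :=
  (sheets.drop 1).foldl pvStepA (sheets.getD 0 [])

-- ===== PORT B =====
def merge_sheets_list_py_alt (sheets : List (List (List (Option Int)))) : List (List (Option Int)) :=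
  let base := sheets.getD 0 []
  let rest := (sheets.drop 1).filter (fun s => ¬ s.isEmpty)
  let rows := (base.length :: rest.map List.length).foldl max 0
  let w0 := if base.isEmpty then 0 else (base.getD 0 []).length
  (List.range rows).map (fun i =>
    (if i < base.length then base.getD i [] else List.replicate w0 (none : Option Int))
    ++ rest.flatMap (fun s =>
         if i < s.length then (none : Option Int) :: s.getD i []
         else List.replicate (1 + (s.getD 0 []).length) (none : Option Int)))

-- ===== PRECONDITION & SPEC =====
-- Pre_ excludes exactly the inputs where Python A raises IndexError: the empty
-- sheets list, and a first sheet that is empty while further sheets exist.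
def Pre_merge_sheets_list_py (sheets : List (List (List (Option Int)))) : Prop :=
  sheets ≠ [] ∧ (sheets.length = 1 ∨ sheets.getD 0 [] ≠ [])
instance (sheets : List (List (List (Option Int)))) : Decidable (Pre_merge_sheets_list_py sheets) := by unfold Pre_merge_sheets_list_py; infer_instance

def pvWitness_merge_sheets_list_py : List (List (List (Option Int))) :=
  [[[some 1, none], [some 2]], [[some 3]], [], [[none], [some 4], [some 5]]]

def Spec_merge_sheets_list_py (sheets : List (List (List (Option Int)))) (out : List (List (Option Int))) : Prop := out = merge_sheets_list_py_alt sheets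
instance (sheets : List (List (List (Option Int)))) (out : List (List (Option Int))) : Decidable (Spec_merge_sheets_list_py sheets out) := by unfold Spec_merge_sheets_list_py; infer_instance

-- ===== CLAIM (what is proved, stated in full; the proofs are below) =====
def Claim_equal_merge_sheets_list_py : Prop := ∀ (sheets : List (List (List (Option Int)))), Dom_merge_sheets_list_py sheets → Pre_merge_sheets_list_py sheets → Spec_merge_sheets_list_py sheets (merge_sheets_list_py sheets)

-- ===== LEMMAS AND PROOFS =====

-- characterization of A's inner loop as a two-list zip-like merge
def pvMix (w : Nat) : List (List (Option Int)) → List (List (Option Int)) → List (List (Option Int))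
  | rows, [] => rows
  | [], b :: bs => (List.replicate w (none : Option Int) ++ (none : Option Int) :: b) :: pvMix w [] bs
  | r :: rows, b :: bs => (r ++ (none : Option Int) :: b) :: pvMix w rows bs

-- B-side row vocabulary (proof helpers)
def pvBasePart (base : List (List (Option Int))) (i : Nat) : List (Option Int) :=
  if i < base.length then base.getD i []
  else List.replicate (if base.isEmpty then 0 else (base.getD 0 []).length) (none : Option Int)

def pvBlk (s : List (List (Option Int))) (i : Nat) : List (Option Int) :=
  if i < s.length then (none : Option Int) :: s.getD i []
  else List.replicate (1 + (s.getD 0 []).length) (none : Option Int)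

def pvRow (base : List (List (Option Int))) (rs : List (List (List (Option Int)))) (i : Nat) : List (Option Int) :=
  pvBasePart base i ++ rs.flatMap (fun s => pvBlk s i)

def pvR (base : List (List (Option Int))) (rs : List (List (List (Option Int)))) : Nat :=
  (base.length :: rs.map List.length).foldl max 0

def pvTbl (base : List (List (Option Int))) (rs : List (List (List (Option Int)))) : List (List (Option Int)) :=
  (List.range (pvR base rs)).map (pvRow base rs)

lemma alt_eq_tbl (sheets : List (List (List (Option Int)))) :
    merge_sheets_list_py_alt sheets
      = pvTbl (sheets.getD 0 []) ((sheets.drop 1).filter (fun s => ¬ s.isEmpty)) := rfl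

lemma modify_append_len {α : Type} (done : List α) (r : α) (rest : List α) (f : α → α) :
    (done ++ r :: rest).modify done.length f = done ++ f r :: rest := by
  induction done with
  | nil => simp
  | cons d done ih => simpa using ih

lemma pvInnerA_eq (w : Nat) (s : List (List (Option Int))) :
    ∀ (done todo : List (List (Option Int))),
      pvInnerA w (done ++ todo) done.length s = done ++ pvMix w todo s := by
  induction s with
  | nil => intro done todo; simp [pvInnerA, pvMix]
  | cons b bs ih =>
    intro done todo
    rw [pvInnerA]
    cases todo with
    | nil =>
      rw [if_neg (by simp)]
      have h := ih (done ++ [List.replicate w (none : Option Int) ++ (none : Option Int) :: b]) []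
      simp only [List.append_nil, List.length_append, List.length_cons, List.length_nil] at h ⊢
      rw [h, pvMix]
      simp
    | cons r rest =>
      rw [if_pos (by simp)]
      rw [show (done ++ r :: rest).modify done.length (· ++ ((none : Option Int) :: b))
            = done ++ (r ++ (none : Option Int) :: b) :: rest from modify_append_len done r rest _]
      have h := ih (done ++ [r ++ (none : Option Int) :: b]) rest
      simp only [List.length_append, List.length_cons, List.length_nil, List.append_assoc,
        List.cons_append, List.nil_append] at h ⊢
      rw [h, pvMix]

lemma pvInnerA_zero (w : Nat) (acc s : List (List (Option Int))) :
    pvInnerA w acc 0 s = pvMix w acc s := by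
  simpa using pvInnerA_eq w s [] acc

lemma pvMix_length (w : Nat) (bs : List (List (Option Int))) :
    ∀ rows, (pvMix w rows bs).length = max rows.length bs.length := by
  induction bs with
  | nil => intro rows; simp [pvMix]
  | cons b bs ih =>
    intro rows
    cases rows with
    | nil => simp [pvMix, ih]
    | cons r rows => simp [pvMix, ih]; try omega

lemma pvMix_getElem (w : Nat) (bs : List (List (Option Int))) :
    ∀ rows i (h : i < (pvMix w rows bs).length),
      (pvMix w rows bs)[i] =
        if i < rows.length then
          (if i < bs.length then rows.getD i [] ++ (none : Option Int) :: bs.getD i [] else rows.getD i [])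
        else List.replicate w (none : Option Int) ++ (none : Option Int) :: bs.getD i [] := by
  induction bs with
  | nil =>
    intro rows i h
    have h' : i < rows.length := by simpa [pvMix] using h
    have e : pvMix w rows [] = rows := rfl
    rw [if_pos h', if_neg (show ¬ i < ([] : List (List (Option Int))).length by simp),
      List.getD_eq_getElem?_getD, List.getElem?_eq_getElem h']
    simp [e]
  | cons b bs ih =>
    intro rows i h
    cases rows with
    | nil =>
      cases i with
      | zero => simp [pvMix]
      | succ j =>
        have := ih [] j (by simpa [pvMix] using h)
        simpa [pvMix] using this
    | cons r rows =>
      cases i with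
      | zero => simp [pvMix]
      | succ j =>
        have := ih rows j (by simpa [pvMix] using h)
        simpa [pvMix] using this

-- pvR bounds
lemma base_le_pvR (base : List (List (Option Int))) (rs : List (List (List (Option Int)))) :
    base.length ≤ pvR base rs := by
  have h2 := (PySem.List.le_foldl_max (base.length :: rs.map List.length) 0).2 base.length (by simp)
  simpa [pvR] using h2

lemma mem_le_pvR {base : List (List (Option Int))} {rs : List (List (List (Option Int)))}
    {s : List (List (Option Int))} (hs : s ∈ rs) : s.length ≤ pvR base rs := by
  have := (PySem.List.le_foldl_max (base.length :: rs.map List.length) 0).2 s.length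
    (by simp; right; exact ⟨s, hs, rfl⟩)
  simpa [pvR] using this

lemma pvR_pos (base : List (List (Option Int))) (rs : List (List (List (Option Int))))
    (hb : base ≠ []) : 0 < pvR base rs :=
  lt_of_lt_of_le (List.length_pos_iff.mpr hb) (base_le_pvR base rs)

lemma pvR_append (base : List (List (Option Int))) (rs : List (List (List (Option Int))))
    (s : List (List (Option Int))) : pvR base (rs ++ [s]) = max (pvR base rs) s.length := by
  simp [pvR, List.foldl_append]

-- flatMap of pure replicates is one replicate of the sum
lemma flatMap_replicate (rs : List (List (List (Option Int)))) (f : List (List (Option Int)) → Nat) :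
    rs.flatMap (fun s => List.replicate (f s) (none : Option Int))
      = List.replicate ((rs.map f).sum) (none : Option Int) := by
  induction rs with
  | nil => simp
  | cons a rs ih =>
    simp only [List.flatMap_cons, List.map_cons, List.sum_cons, ih]
    rw [List.replicate_add]

-- table access
lemma tbl_length (base : List (List (Option Int))) (rs : List (List (List (Option Int)))) :
    (pvTbl base rs).length = pvR base rs := by simp [pvTbl]

lemma tbl_getElem (base : List (List (Option Int))) (rs : List (List (List (Option Int))))
    (i : Nat) (h : i < (pvTbl base rs).length) : (pvTbl base rs)[i] = pvRow base rs i := by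
  simp [pvTbl] at h ⊢

lemma tbl_getD (base : List (List (Option Int))) (rs : List (List (List (Option Int))))
    (i : Nat) (h : i < pvR base rs) : (pvTbl base rs).getD i [] = pvRow base rs i := by
  rw [List.getD_eq_getElem?_getD, List.getElem?_eq_getElem (by simpa [tbl_length] using h)]
  simp [tbl_getElem]

-- the width bookkeeping: length of row 0
def pvW (base : List (List (Option Int))) (rs : List (List (List (Option Int)))) : Nat :=
  (base.getD 0 []).length + (rs.map (fun s => 1 + (s.getD 0 []).length)).sum

lemma row_zero_length (base : List (List (Option Int))) (rs : List (List (List (Option Int))))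
    (hb : base ≠ []) (hrs : ∀ s ∈ rs, s ≠ []) :
    (pvRow base rs 0).length = pvW base rs := by
  have hb' : 0 < base.length := List.length_pos_iff.mpr hb
  have hmap : rs.map (fun s => (pvBlk s 0).length)
      = rs.map (fun s => 1 + (s.getD 0 []).length) := by
    apply List.map_congr_left
    intro s hs
    have h0 : 0 < s.length := List.length_pos_iff.mpr (hrs s hs)
    simp [pvBlk, h0]
    omega
  rw [pvRow, List.length_append, List.length_flatMap]
  rw [show (List.map (fun s => (pvBlk s 0).length) rs) = _ from hmap]
  rw [pvBasePart, if_pos hb', pvW]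

-- rows past the end of every sheet are pure padding
lemma row_ge (base : List (List (Option Int))) (rs : List (List (List (Option Int))))
    (i : Nat) (hi : pvR base rs ≤ i) :
    pvRow base rs i = List.replicate (pvW base rs) (none : Option Int) := by
  have hbase : ¬ i < base.length := by
    have := base_le_pvR base rs; omega
  have hfm : rs.flatMap (fun s => pvBlk s i)
      = rs.flatMap (fun s => List.replicate (1 + (s.getD 0 []).length) (none : Option Int)) := by
    apply List.flatMap_congr
    intro s hs
    have : ¬ i < s.length := by have := mem_le_pvR (base := base) hs; omega
    simp [pvBlk, this]
  have hw0 : (if base.isEmpty then 0 else (base.getD 0 []).length) = (base.getD 0 []).length := by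
    cases base <;> simp
  rw [pvRow, hfm, flatMap_replicate, pvBasePart, if_neg hbase, hw0, pvW, ← List.replicate_add]

lemma row_append (base : List (List (Option Int))) (rs : List (List (List (Option Int))))
    (s : List (List (Option Int))) (i : Nat) :
    pvRow base (rs ++ [s]) i = pvRow base rs i ++ pvBlk s i := by
  simp [pvRow, List.flatMap_append]

lemma stepA_eq (sl sheet : List (List (Option Int))) :
    pvStepA sl sheet =
      (pvMix (sl.getD 0 []).length sl sheet).mapIdx (fun i row =>
        if i < sheet.length then row
        else row ++ List.replicate
          (((pvMix (sl.getD 0 []).length sl sheet).getD 0 []).length - (sl.getD 0 []).length)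
          (none : Option Int)) := by
  simp [pvStepA, pvInnerA_zero]

-- A's per-sheet step advances the table by one block column
lemma step_tbl (base : List (List (Option Int))) (rs : List (List (List (Option Int))))
    (s : List (List (Option Int))) (hb : base ≠ []) (hrs : ∀ s' ∈ rs, s' ≠ []) (hs : s ≠ []) :
    pvStepA (pvTbl base rs) s = pvTbl base (rs ++ [s]) := by
  have hR : 0 < pvR base rs := pvR_pos base rs hb
  have hsl : 0 < s.length := List.length_pos_iff.mpr hs
  have hlsb : ((pvTbl base rs).getD 0 []).length = pvW base rs := by
    rw [tbl_getD base rs 0 hR, row_zero_length base rs hb hrs]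
  have hmixlen : (pvMix ((pvTbl base rs).getD 0 []).length (pvTbl base rs) s).length
      = max (pvR base rs) s.length := by
    rw [pvMix_length, tbl_length]
  have hmix0 : (pvMix ((pvTbl base rs).getD 0 []).length (pvTbl base rs) s).getD 0 []
      = pvRow base rs 0 ++ (none : Option Int) :: s.getD 0 [] := by
    have h0 : 0 < (pvMix ((pvTbl base rs).getD 0 []).length (pvTbl base rs) s).length := by omega
    rw [List.getD_eq_getElem?_getD, List.getElem?_eq_getElem h0]
    rw [pvMix_getElem _ _ _ _ h0]
    rw [if_pos (by rw [tbl_length]; omega), if_pos hsl, tbl_getD base rs 0 hR]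
    simp
  have hamend : ((pvMix ((pvTbl base rs).getD 0 []).length (pvTbl base rs) s).getD 0 []).length
      - ((pvTbl base rs).getD 0 []).length = 1 + (s.getD 0 []).length := by
    rw [hmix0, hlsb, List.length_append, row_zero_length base rs hb hrs]
    simp
    omega
  rw [stepA_eq]
  apply List.ext_getElem
  · rw [List.length_mapIdx, hmixlen, tbl_length, pvR_append]
  · intro i h1 h2
    have hiR : i < max (pvR base rs) s.length := by
      rw [List.length_mapIdx, hmixlen] at h1; exact h1
    rw [List.getElem_mapIdx]
    rw [pvMix_getElem _ _ _ _ (by omega)]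
    rw [tbl_getElem _ _ _ h2, row_append, hamend, tbl_length]
    by_cases hir : i < pvR base rs
    · rw [if_pos hir, tbl_getD base rs i hir]
      by_cases his : i < s.length
      · rw [if_pos his, if_pos his, pvBlk, if_pos his]
      · rw [if_neg his, if_neg his, pvBlk, if_neg his]
    · have his : i < s.length := by omega
      rw [if_neg hir, if_pos his, pvBlk, if_pos his, hlsb, row_ge base rs i (by omega)]

lemma step_nil (sl : List (List (Option Int))) : pvStepA sl [] = sl := by
  rw [stepA_eq]
  apply List.ext_getElem
  · simp [pvMix]
  · intro i h1 h2
    rw [List.getElem_mapIdx]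
    simp [pvMix]

lemma tbl_nil (base : List (List (Option Int))) : pvTbl base [] = base := by
  apply List.ext_getElem
  · simp [pvTbl, pvR]
  · intro i h1 h2
    have h : i < base.length := by simpa [pvTbl, pvR] using h1
    rw [tbl_getElem _ _ _ h1]
    simp [pvRow, pvBasePart, h, pvBlk, List.getD_eq_getElem?_getD]

lemma fold_tbl (base : List (List (Option Int))) (hb : base ≠ []) :
    ∀ (rest rs : List (List (List (Option Int)))), (∀ s' ∈ rs, s' ≠ []) →
      rest.foldl pvStepA (pvTbl base rs)
        = pvTbl base (rs ++ rest.filter (fun s => ¬ s.isEmpty)) := by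
  intro rest
  induction rest with
  | nil => intro rs _; simp
  | cons s rest ih =>
    intro rs hrs
    by_cases hs : s = []
    · subst hs
      simpa [List.foldl_cons, step_nil] using ih rs hrs
    · rw [List.foldl_cons, step_tbl base rs s hb hrs hs, ih (rs ++ [s])
        (by intro s' hs'
            rcases List.mem_append.mp hs' with h | h
            · exact hrs s' h
            · simp at h; subst h; exact hs)]
      simp [hs]

-- ===== VERDICT (by name: the statement is the Claim_ definition above) =====
theorem merge_sheets_list_py_spec : Claim_equal_merge_sheets_list_py := by
  intro sheets _ hpre
  unfold Spec_merge_sheets_list_py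
  obtain ⟨hne, hpre2⟩ := hpre
  cases sheets with
  | nil => exact absurd rfl hne
  | cons base rest0 =>
    rw [alt_eq_tbl]
    unfold merge_sheets_list_py
    simp only [List.drop_succ_cons, List.drop_zero, List.getD_cons_zero]
    cases rest0 with
    | nil => simp [tbl_nil]
    | cons s rest =>
      have hb : base ≠ [] := by
        rcases hpre2 with h | h
        · simp at h
        · simpa using h
      have hfold := fold_tbl base hb (s :: rest) [] (by intro s' h; simp at h)
      rw [tbl_nil] at hfold
      simpa using hfold
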